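-- pv_equiv track=rewrite | github.com/sergioodesigner/whatsbot | db/repositories/automation_repo.py | _host_matches_whitelist
-- ===== SOURCE A (Python) =====
-- def _host_matches_whitelist(host: str, domains: list[str]) -> bool:
--     for domain in domains:
--         d = str(domain or "").strip().lower().lstrip(".")
--         if not d:
--             continue
--         if host == d or host.endswith("." + d):
--             return True
--     return False
-- ===== SOURCE B (Python) =====
-- def _host_matches_whitelist(host: str, domains: list[str]) -> bool:
--     # Build the set of normalized whitelist domains once, then test the raw
--     # host and each of its dot-delimited tails against it.
--     allowed = set()
--     for domain in domains:
--         d = str(domain or "").strip().lower().lstrip(".")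
--         if d:
--             allowed.add(d)
--     if host in allowed:
--         return True
--     for i in range(len(host)):
--         if host[i] == "." and host[i + 1:] in allowed:
--             return True
--     return False
-- ===== Notes on version B (the rewrite author's own statement) =====
-- stated objective: alternative
-- what changed: B builds a set of normalized whitelist domains once and then probes it with the raw host and each dot-delimited tail of the host, instead of A's per-domain loop that re-normalizes every domain and tests two suffix conditions against the host.
import Mathlib
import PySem

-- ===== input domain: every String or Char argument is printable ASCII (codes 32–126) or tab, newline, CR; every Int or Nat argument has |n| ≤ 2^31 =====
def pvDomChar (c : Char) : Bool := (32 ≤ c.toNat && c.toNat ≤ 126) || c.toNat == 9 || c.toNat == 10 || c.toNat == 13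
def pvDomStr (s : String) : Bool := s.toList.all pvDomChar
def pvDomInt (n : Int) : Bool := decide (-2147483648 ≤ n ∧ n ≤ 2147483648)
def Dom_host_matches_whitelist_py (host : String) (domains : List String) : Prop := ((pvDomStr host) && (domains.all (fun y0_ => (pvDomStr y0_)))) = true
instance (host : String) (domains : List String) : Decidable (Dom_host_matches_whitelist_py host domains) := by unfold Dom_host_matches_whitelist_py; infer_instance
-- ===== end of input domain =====

-- B replaces A's per-domain linear scan (normalize every domain, test two suffix
-- conditions against the host) by building the set of normalized domains once and
-- probing it with the raw host and each of its dot-delimited tails (objective: alternative).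


-- ===== PORT A =====
-- str(domain or "").strip().lower().lstrip(".")  — both Pythons contain this exact line.
-- lstrip(".") is ported by hand as dropWhile (· == '.'): exact, it drops exactly the leading dots.
def pvNormDomain (domain : String) : List Char :=
  (PySem.Chars.lower (PySem.Chars.strip (if domain == "" then "" else domain).toList)).dropWhile (· == '.')

-- the for-loop of A: first domain that normalizes nonempty and matches wins
def pvALoop (host : List Char) : List String → Bool
  | [] => false
  | domain :: rest =>
      let d := pvNormDomain domain
      if d.isEmpty then pvALoop host rest
      else if host == d || PySem.Chars.endswith host ('.' :: d) then true
      else pvALoop host rest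

def host_matches_whitelist_py (host : String) (domains : List String) : Bool :=
  pvALoop host.toList domains

-- ===== PORT B =====
-- the index loop of B: at position i look at host[i] and the tail host[i+1:] (here: head and rest of the suffix)
def pvBTails (rest : List Char) (allowed : PySem.Set (List Char)) : Bool :=
  match rest with
  | [] => false
  | ch :: rest' =>
      if ch == '.' && PySem.Set.contains allowed rest' then true
      else pvBTails rest' allowed

def host_matches_whitelist_py_alt (host : String) (domains : List String) : Bool :=
  let allowed : PySem.Set (List Char) :=
    domains.foldl (fun s domain =>
      let d := pvNormDomain domain
      if d.isEmpty then s else PySem.Set.add s d) PySem.Set.empty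
  if PySem.Set.contains allowed host.toList then true
  else pvBTails host.toList allowed

-- ===== PRECONDITION & SPEC =====
def Spec_host_matches_whitelist_py (host : String) (domains : List String) (out : Bool) : Prop := out = host_matches_whitelist_py_alt host domains
instance (host : String) (domains : List String) (out : Bool) : Decidable (Spec_host_matches_whitelist_py host domains out) := by unfold Spec_host_matches_whitelist_py; infer_instance

-- ===== CLAIM (what is proved, stated in full; the proofs are below) =====
def Claim_equal_host_matches_whitelist_py : Prop := ∀ (host : String) (domains : List String), Dom_host_matches_whitelist_py host domains → Spec_host_matches_whitelist_py host domains (host_matches_whitelist_py host domains)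

-- ===== LEMMAS AND PROOFS =====

-- the common specification: some domain normalizes to a nonempty d with host = d or host ends with "." + d
def pvMatchSpec (host : List Char) (domains : List String) : Prop :=
  ∃ domain ∈ domains, pvNormDomain domain ≠ [] ∧
    (host = pvNormDomain domain ∨ ('.' :: pvNormDomain domain) <:+ host)

lemma pvALoop_iff (host : List Char) (domains : List String) :
    pvALoop host domains = true ↔ pvMatchSpec host domains := by
  induction domains with
  | nil => simp [pvALoop, pvMatchSpec]
  | cons domain rest ih =>
    simp only [pvALoop, pvMatchSpec]
    by_cases hd : (pvNormDomain domain).isEmpty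
    · simp only [hd, if_true]
      rw [ih]
      simp only [List.isEmpty_iff] at hd
      constructor
      · rintro ⟨x, hx, h⟩; exact ⟨x, List.mem_cons_of_mem _ hx, h⟩
      · rintro ⟨x, hx, h⟩
        rcases List.mem_cons.1 hx with rfl | hx
        · exact absurd hd h.1
        · exact ⟨x, hx, h⟩
    · simp only [hd, Bool.false_eq_true, if_false]
      simp only [List.isEmpty_iff] at hd
      by_cases hm : (host == pvNormDomain domain || PySem.Chars.endswith host ('.' :: pvNormDomain domain)) = true
      · simp only [hm, if_true, true_iff]
        refine ⟨domain, List.mem_cons_self, hd, ?_⟩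
        simp only [Bool.or_eq_true, beq_iff_eq, PySem.Chars.endswith_iff] at hm
        exact hm
      · simp only [hm, Bool.false_eq_true, if_false]
        rw [ih]
        simp only [Bool.or_eq_true, beq_iff_eq, PySem.Chars.endswith_iff] at hm
        push Not at hm
        constructor
        · rintro ⟨x, hx, h⟩; exact ⟨x, List.mem_cons_of_mem _ hx, h⟩
        · rintro ⟨x, hx, h⟩
          rcases List.mem_cons.1 hx with rfl | hx
          · rcases h.2 with h2 | h2
            · exact absurd h2 hm.1
            · exact absurd h2 hm.2
          · exact ⟨x, hx, h⟩

-- membership in the set B builds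
lemma pv_mem_allowed (domains : List String) (s : PySem.Set (List Char)) (x : List Char) :
    x ∈ domains.foldl (fun s domain =>
      let d := pvNormDomain domain
      if d.isEmpty then s else PySem.Set.add s d) s ↔
    x ∈ s ∨ ∃ domain ∈ domains, pvNormDomain domain ≠ [] ∧ pvNormDomain domain = x := by
  induction domains generalizing s with
  | nil => simp
  | cons domain rest ih =>
    simp only [List.foldl_cons]
    rw [ih]
    by_cases hd : (pvNormDomain domain).isEmpty
    · simp only [hd, if_true]
      simp only [List.isEmpty_iff] at hd
      constructor
      · rintro (h | ⟨y, hy, h⟩)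
        · exact Or.inl h
        · exact Or.inr ⟨y, List.mem_cons_of_mem _ hy, h⟩
      · rintro (h | ⟨y, hy, h⟩)
        · exact Or.inl h
        · rcases List.mem_cons.1 hy with rfl | hy
          · exact absurd hd h.1
          · exact Or.inr ⟨y, hy, h⟩
    · simp only [hd, Bool.false_eq_true, if_false]
      simp only [List.isEmpty_iff] at hd
      constructor
      · rintro (h | ⟨y, hy, h⟩)
        · rcases (PySem.Set.mem_add s (pvNormDomain domain) x).1 h with h | rfl
          · exact Or.inl h
          · exact Or.inr ⟨domain, List.mem_cons_self, hd, rfl⟩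
        · exact Or.inr ⟨y, List.mem_cons_of_mem _ hy, h⟩
      · rintro (h | ⟨y, hy, h⟩)
        · exact Or.inl ((PySem.Set.mem_add s (pvNormDomain domain) x).2 (Or.inl h))
        · rcases List.mem_cons.1 hy with rfl | hy
          · exact Or.inl ((PySem.Set.mem_add s (pvNormDomain y) x).2 (Or.inr h.2.symm))
          · exact Or.inr ⟨y, hy, h⟩

lemma pvBTails_iff (host : List Char) (allowed : PySem.Set (List Char)) :
    pvBTails host allowed = true ↔ ∃ t, ('.' :: t) <:+ host ∧ t ∈ allowed := by
  induction host with
  | nil => simp [pvBTails, List.suffix_nil]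
  | cons c cs ih =>
    simp only [pvBTails]
    by_cases h : (c == '.' && PySem.Set.contains allowed cs) = true
    · simp only [h, if_true, true_iff]
      simp only [Bool.and_eq_true, beq_iff_eq] at h
      exact ⟨cs, h.1 ▸ List.suffix_refl _, (PySem.Set.contains_iff allowed cs).1 h.2⟩
    · simp only [h, Bool.false_eq_true, if_false]
      rw [ih]
      simp only [Bool.and_eq_true, beq_iff_eq, not_and] at h
      constructor
      · rintro ⟨t, ht, hm⟩; exact ⟨t, ht.trans (List.suffix_cons c cs), hm⟩
      · rintro ⟨t, ht, hm⟩
        rcases ht with ⟨pre, hpre⟩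
        cases pre with
        | nil =>
          simp only [List.nil_append, List.cons.injEq] at hpre
          exact absurd ((PySem.Set.contains_iff allowed t).2 hm)
            (by rw [hpre.2] at hm ⊢; exact fun hc => (h hpre.1.symm) hc)
        | cons p ps =>
          simp only [List.cons_append, List.cons.injEq] at hpre
          exact ⟨t, ⟨ps, hpre.2⟩, hm⟩

lemma pvB_iff (host : String) (domains : List String) :
    host_matches_whitelist_py_alt host domains = true ↔ pvMatchSpec host.toList domains := by
  unfold host_matches_whitelist_py_alt pvMatchSpec
  simp only []
  set allowed := domains.foldl (fun s domain =>
      let d := pvNormDomain domain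
      if d.isEmpty then s else PySem.Set.add s d) PySem.Set.empty with hS
  have hmem : ∀ x, x ∈ allowed ↔ ∃ domain ∈ domains, pvNormDomain domain ≠ [] ∧ pvNormDomain domain = x := by
    intro x; rw [hS, pv_mem_allowed]
    simp [PySem.Set.empty]
  by_cases hc : PySem.Set.contains allowed host.toList = true
  · simp only [hc, if_true, true_iff]
    rcases (hmem _).1 ((PySem.Set.contains_iff allowed host.toList).1 hc) with ⟨y, hy, hne, heq⟩
    exact ⟨y, hy, hne, Or.inl heq.symm⟩
  · simp only [hc, Bool.false_eq_true, if_false]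
    rw [pvBTails_iff]
    constructor
    · rintro ⟨t, hsuf, hm⟩
      rcases (hmem _).1 hm with ⟨y, hy, hne, rfl⟩
      exact ⟨y, hy, hne, Or.inr hsuf⟩
    · rintro ⟨y, hy, hne, h | h⟩
      · exact absurd ((PySem.Set.contains_iff allowed host.toList).2
          ((hmem _).2 ⟨y, hy, hne, h.symm⟩)) hc
      · exact ⟨pvNormDomain y, h, (hmem _).2 ⟨y, hy, hne, rfl⟩⟩

-- ===== VERDICT (by name: the statement is the Claim_ definition above) =====
theorem host_matches_whitelist_py_spec : Claim_equal_host_matches_whitelist_py := by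
  intro host domains _
  unfold Spec_host_matches_whitelist_py
  have hA := pvALoop_iff host.toList domains
  have hB := pvB_iff host domains
  unfold host_matches_whitelist_py
  cases hb : host_matches_whitelist_py_alt host domains with
  | true => exact (hA.2 (hB.1 hb))
  | false =>
    cases ha : pvALoop host.toList domains with
    | false => rfl
    | true => rw [← hb, hB.2 (hA.1 ha)]
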